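-- pv_equiv track=rewrite | github.com/DhellionFena/analisador-lexico | funcoes.py | separar_texto
-- ===== SOURCE A (Python) =====
-- def separador(palavra, caractere):
--     index = encontrar_indices(palavra, caractere)
--     cont = 0
--     for i in index:
--         palavra = palavra[:i+cont] + ' ' + palavra[i+cont] + ' ' +palavra[i+cont+1:]
--         cont += 2
--
--     return palavra
--
-- def encontrar_indices(palavra, caractere):
--     indices = []
--     for i in range(len(palavra)):
--         if palavra[i] == caractere:
--             indices.append(i)
--     return indices
--
-- def separar_texto(lista):
--     caracteres = [
--                 ';', '"', '(', ')', '.', '>',  '<',  '~', '=', '+', '-',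
--                 '*', '/', '[', ']', '&',  '%',  '$', '@',  '!',  '?', ',',
--                 ':', '{', '}'
--                 ]
--
--     texto_separado = []
--     for palavra in lista:
--         nova_lista = []
--         for c in caracteres:
--             if c in palavra:
--                 palavra = separador(palavra, c)
--         p = palavra.split()
--         for item in p:
--             texto_separado.append(item)
--
--     return texto_separado
-- ===== SOURCE B (Python) =====
-- SPECIALS = set(';"().><~=+-*/[]&%$@!?,:{}')
-- WHITESPACE = ' \t\n\r\x0b\x0c'
--
-- def separar_texto(lista):
--     # single left-to-right pass per word: emit buffered run on whitespace/special,
--     # emit each special character as its own token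
--     out = []
--     for palavra in lista:
--         buf = []
--         for ch in palavra:
--             if ch in SPECIALS:
--                 if buf:
--                     out.append(''.join(buf))
--                     buf = []
--                 out.append(ch)
--             elif ch in WHITESPACE:
--                 if buf:
--                     out.append(''.join(buf))
--                     buf = []
--             else:
--                 buf.append(ch)
--         if buf:
--             out.append(''.join(buf))
--     return out
-- ===== Notes on version B (the rewrite author's own statement) =====
-- stated objective: faster
-- what changed: Replaces the per-special-character index-scan-and-splice passes plus a final split with one left-to-right pass per word that flushes a buffer at whitespace/special characters and emits each special character directly as a token.
import Mathlib
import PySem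

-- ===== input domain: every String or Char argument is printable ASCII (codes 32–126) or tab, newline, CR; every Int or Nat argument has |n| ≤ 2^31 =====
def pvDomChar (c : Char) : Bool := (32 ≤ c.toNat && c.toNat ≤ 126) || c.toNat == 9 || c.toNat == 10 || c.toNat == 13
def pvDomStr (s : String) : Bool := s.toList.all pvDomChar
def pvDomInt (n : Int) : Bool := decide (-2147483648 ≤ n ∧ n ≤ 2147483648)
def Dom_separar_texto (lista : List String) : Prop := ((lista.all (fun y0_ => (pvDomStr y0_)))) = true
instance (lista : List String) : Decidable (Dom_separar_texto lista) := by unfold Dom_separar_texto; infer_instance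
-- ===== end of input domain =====

-- B replaces A's per-special-character index-scan-and-splice passes plus final split()
-- by a single left-to-right pass per word (objective: faster, asymptotically).
-- Strings are ported on List Char (PySem convention); words never mutate observably.

-- ===== PORT A =====
-- 'encontrar_indices(palavra, caractere)': indices i with palavra[i] == caractere.
-- palavra[i] is always in range (i from range(len(palavra))), so pyGetD is exact here.
def encontrar_indices (palavra : List Char) (caractere : Char) : List Int :=
  (PySem.List.pyRange 0 (palavra.length : Int) 1).foldl
    (fun indices i =>
      if PySem.List.pyGetD palavra i ' ' = caractere then indices ++ [i] else indices)
    []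

-- 'separador(palavra, caractere)': splice ' ' around each occurrence, offset cont grows by 2.
def separador (palavra : List Char) (caractere : Char) : List Char :=
  ((encontrar_indices palavra caractere).foldl
    (fun (st : List Char × Int) i =>
      (PySem.List.slice st.1 none (some (i + st.2)) ++ [' ']
         ++ [PySem.List.pyGetD st.1 (i + st.2) ' '] ++ [' ']
         ++ PySem.List.slice st.1 (some (i + st.2 + 1)) none,
       st.2 + 2))
    (palavra, 0)).1

def caracteres : List Char :=
  [';', '"', '(', ')', '.', '>', '<', '~', '=', '+', '-',
   '*', '/', '[', ']', '&', '%', '$', '@', '!', '?', ',',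
   ':', '{', '}']

-- ('nova_lista = []' in A is dead code and is not ported.)
def separar_texto (lista : List String) : List String :=
  lista.foldl
    (fun texto_separado palavra =>
      let w := caracteres.foldl
        (fun palavra c => if palavra.contains c then separador palavra c else palavra)
        palavra.toList
      texto_separado ++ (PySem.Chars.split₀ w).map String.ofList)
    []

-- ===== PORT B =====
def specialsB : List Char :=
  [';', '"', '(', ')', '.', '>', '<', '~', '=', '+', '-',
   '*', '/', '[', ']', '&', '%', '$', '@', '!', '?', ',',
   ':', '{', '}']

def whitespaceB : List Char := [' ', '\t', '\n', '\r', '\x0b', '\x0c']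

def separar_texto_alt (lista : List String) : List String :=
  lista.foldl
    (fun out palavra =>
      let st := palavra.toList.foldl
        (fun (st : List String × List Char) ch =>
          if specialsB.contains ch then
            ((if st.2.isEmpty then st.1 else st.1 ++ [String.ofList st.2])
               ++ [String.ofList [ch]], [])
          else if whitespaceB.contains ch then
            ((if st.2.isEmpty then st.1 else st.1 ++ [String.ofList st.2]), [])
          else (st.1, st.2 ++ [ch]))
        (out, [])
      if st.2.isEmpty then st.1 else st.1 ++ [String.ofList st.2])
    []

-- ===== PRECONDITION & SPEC =====
def Spec_separar_texto (lista : List String) (out : List String) : Prop := out = separar_texto_alt lista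
instance (lista : List String) (out : List String) : Decidable (Spec_separar_texto lista out) := by unfold Spec_separar_texto; infer_instance

-- ===== CLAIM (what is proved, stated in full; the proofs are below) =====
def Claim_equal_separar_texto : Prop := ∀ (lista : List String), Dom_separar_texto lista → Spec_separar_texto lista (separar_texto lista)

-- ===== LEMMAS AND PROOFS =====

-- occurrence positions of c in t, starting at offset k (proof-side mirror of encontrar_indices)
def idxI (t : List Char) (c : Char) (k : Int) : List Int :=
  match t with
  | [] => []
  | a :: t => (if a = c then [k] else []) ++ idxI t c (k + 1)

-- ' c ' substitution as a flatMap (proof-side mirror of separador)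
def expandC (c : Char) (l : List Char) : List Char :=
  l.flatMap (fun ch => if ch = c then [' ', ch, ' '] else [ch])

-- what all 25 expansions do to one character
def gAll (ch : Char) : List Char := if ch ∈ caracteres then [' ', ch, ' '] else [ch]

-- B's per-word tokens, recursively (buf = pending run, in order)
def T (buf : List Char) (p : List Char) : List String :=
  match p with
  | [] => if buf.isEmpty then [] else [String.ofList buf]
  | a :: t =>
    if specialsB.contains a then
      (if buf.isEmpty then [] else [String.ofList buf]) ++ [String.ofList [a]] ++ T [] t
    else if whitespaceB.contains a then
      (if buf.isEmpty then [] else [String.ofList buf]) ++ T [] t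
    else T (buf ++ [a]) t

lemma L1 (c : Char) (t : List Char) : ∀ (u : List Char) (acc : List Int),
    (PySem.List.pyRange (u.length : Int) ((u.length : Int) + t.length) 1).foldl
      (fun indices i =>
        if PySem.List.pyGetD (u ++ t) i ' ' = c then indices ++ [i] else indices) acc
      = acc ++ idxI t c u.length := by
  induction t with
  | nil =>
    intro u acc
    simp [idxI, PySem.List.pyRange_one_eq_nil]
  | cons a t ih =>
    intro u acc
    rw [PySem.List.pyRange_one_cons (by simp)]
    simp only [List.foldl_cons]
    have hget : PySem.List.pyGetD (u ++ a :: t) ((u.length : Int)) ' ' = a := by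
      rw [PySem.List.pyGetD_natCast]
      simp [List.getD]
    have hrest : (PySem.List.pyRange ((u.length : Int) + 1) ((u.length : Int) + (a :: t).length) 1)
        = PySem.List.pyRange (((u ++ [a]).length : Int)) (((u ++ [a]).length : Int) + t.length) 1 := by
      congr 1 <;> (simp; try omega)
    have key := ih (u ++ [a]) (if a = c then acc ++ [(u.length : Int)] else acc)
    rw [hget, hrest]
    by_cases hac : a = c
    · subst hac
      simp only [List.append_assoc, List.singleton_append] at key
      simp only [reduceIte] at key ⊢
      rw [key]
      simp [idxI]
    · simp only [if_neg hac] at key ⊢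
      simp only [List.append_assoc, List.singleton_append] at key
      rw [key]
      simp [idxI, hac]

lemma encontrar_eq_idxI (p : List Char) (c : Char) :
    (PySem.List.pyRange 0 (p.length : Int) 1).foldl
      (fun indices i =>
        if PySem.List.pyGetD p i ' ' = c then indices ++ [i] else indices) []
      = idxI p c 0 := by
  have := L1 c p [] []
  simpa using this

lemma G (c : Char) (t : List Char) : ∀ (u : List Char) (cont : Int),
    ((idxI t c ((u.length : Int) - cont)).foldl
      (fun (st : List Char × Int) i =>
        (PySem.List.slice st.1 none (some (i + st.2)) ++ [' ']
           ++ [PySem.List.pyGetD st.1 (i + st.2) ' '] ++ [' ']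
           ++ PySem.List.slice st.1 (some (i + st.2 + 1)) none,
         st.2 + 2))
      (u ++ t, cont)).1 = u ++ expandC c t := by
  induction t with
  | nil => intro u cont; simp [idxI, expandC]
  | cons a t ih =>
    intro u cont
    by_cases hac : a = c
    · subst hac
      simp only [idxI, reduceIte, List.singleton_append, List.foldl_cons]
      have e1 : (u.length : Int) - cont + cont = (u.length : Int) := by ring
      rw [e1]
      have hslice1 : PySem.List.slice (u ++ a :: t) none (some ((u.length : Int))) = u := by
        rw [PySem.List.slice_to_natCast]
        simp
      have hget : PySem.List.pyGetD (u ++ a :: t) ((u.length : Int)) ' ' = a := by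
        rw [PySem.List.pyGetD_natCast]; simp [List.getD]
      have hslice2 : PySem.List.slice (u ++ a :: t) (some ((u.length : Int) + 1)) none = t := by
        have : ((u.length : Int) + 1) = (((u ++ [a]).length : Nat) : Int) := by simp only [List.length_append, List.length_cons, List.length_nil]; push_cast; omega
        rw [this, PySem.List.slice_from_natCast, show u ++ a :: t = (u ++ [a]) ++ t from by simp]
        simp
      rw [hslice1, hget, hslice2]
      have key := ih (u ++ [' ', a, ' ']) (cont + 2)
      have e2 : ((u ++ [' ', a, ' ']).length : Int) - (cont + 2) = (u.length : Int) - cont + 1 := by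
        simp only [List.length_append, List.length_cons, List.length_nil]; push_cast; omega
      rw [e2] at key
      simp only [List.append_assoc, List.cons_append, List.nil_append] at key ⊢
      rw [key]
      simp [expandC]
    · simp only [idxI, if_neg hac, List.nil_append]
      have key := ih (u ++ [a]) cont
      have e2 : ((u ++ [a]).length : Int) - cont = (u.length : Int) - cont + 1 := by
        simp only [List.length_append, List.length_cons, List.length_nil]; push_cast; omega
      rw [e2] at key
      simp only [List.append_assoc, List.cons_append, List.nil_append] at key ⊢
      rw [key]
      simp [expandC, hac]

lemma separador_eq_expand (p : List Char) (c : Char) :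
    separador p c = expandC c p := by
  unfold separador
  rw [encontrar_indices.eq_1, encontrar_eq_idxI]
  have := G c p [] 0
  simpa using this

lemma expand_not_mem (c : Char) (l : List Char) (h : c ∉ l) : expandC c l = l := by
  induction l with
  | nil => simp [expandC]
  | cons a t ih =>
    simp only [List.mem_cons, not_or] at h
    simp only [expandC, List.flatMap_cons] at *
    rw [if_neg (fun hac => h.1 hac.symm), ih h.2]
    simp

lemma foldE_fixed (cs : List Char) : ∀ (l : List Char), (∀ x ∈ l, x ∉ cs) →
    cs.foldl (fun w c => expandC c w) l = l := by
  induction cs with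
  | nil => intro l _; simp
  | cons c cs ih =>
    intro l h
    have hc : c ∉ l := fun hcl => (h c hcl) (List.mem_cons_self)
    simp only [List.foldl_cons, expand_not_mem c l hc]
    exact ih l (fun x hx => fun hxcs => (h x hx) (List.mem_cons_of_mem c hxcs))

lemma foldE_append (cs : List Char) : ∀ (x y : List Char),
    cs.foldl (fun w c => expandC c w) (x ++ y)
      = cs.foldl (fun w c => expandC c w) x ++ cs.foldl (fun w c => expandC c w) y := by
  induction cs with
  | nil => intro x y; simp
  | cons c cs ih =>
    intro x y
    simp only [List.foldl_cons, expandC, List.flatMap_append]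
    exact ih _ _

lemma foldE_single (cs : List Char) : ∀ (a : Char), ' ' ∉ cs → cs.Nodup →
    cs.foldl (fun w c => expandC c w) [a] = if a ∈ cs then [' ', a, ' '] else [a] := by
  induction cs with
  | nil => intro a _ _; simp
  | cons c cs ih =>
    intro a hsp hnd
    simp only [List.mem_cons, not_or] at hsp
    simp only [List.nodup_cons] at hnd
    by_cases hac : a = c
    · subst hac
      have h1 : expandC a [a] = [' ', a, ' '] := by simp [expandC]
      rw [List.foldl_cons, h1,
        foldE_fixed cs [' ', a, ' '] (by
          intro x hx hxcs
          rcases (by simpa using hx : x = ' ' ∨ x = a ∨ x = ' ') with h | h | h <;> subst h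
          exacts [hsp.2 hxcs, hnd.1 hxcs, hsp.2 hxcs])]
      simp
    · have h1 : expandC c [a] = [a] := by simp [expandC, hac]
      rw [List.foldl_cons, h1, ih a hsp.2 hnd.2]
      simp [hac]

lemma foldE_flatMap (p : List Char) :
    caracteres.foldl (fun w c => expandC c w) p = p.flatMap gAll := by
  induction p with
  | nil => simpa using foldE_fixed caracteres [] (by simp)
  | cons a t ih =>
    rw [show (a :: t) = [a] ++ t from rfl, foldE_append, ih,
      foldE_single caracteres a (by decide) (by decide)]
    simp [gAll]

lemma foldA_eq_flatMap (p : List Char) :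
    caracteres.foldl
      (fun palavra c => if palavra.contains c then separador palavra c else palavra) p
      = p.flatMap gAll := by
  have hfun : (fun (palavra : List Char) (c : Char) =>
      if palavra.contains c then separador palavra c else palavra)
      = fun palavra c => expandC c palavra := by
    funext w c
    by_cases h : w.contains c
    · rw [if_pos h, separador_eq_expand]
    · rw [if_neg h, expand_not_mem c w (by simpa using h)]
  rw [hfun]
  exact foldE_flatMap p

lemma go_nil (cur : List Char) (acc : List (List Char)) :
    PySem.Chars.split₀.go [] cur acc =
      if cur.isEmpty then acc.reverse else (cur.reverse :: acc).reverse := by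
  simp [PySem.Chars.split₀.go]

lemma go_space (c : Char) (h : PySem.Chars.isspace c = true) (rest : List Char)
    (cur : List Char) (acc : List (List Char)) :
    PySem.Chars.split₀.go (c :: rest) cur acc =
      if cur.isEmpty then PySem.Chars.split₀.go rest [] acc
      else PySem.Chars.split₀.go rest [] (cur.reverse :: acc) := by
  simp [PySem.Chars.split₀.go, h]

lemma go_nonspace (c : Char) (h : PySem.Chars.isspace c = false) (rest : List Char)
    (cur : List Char) (acc : List (List Char)) :
    PySem.Chars.split₀.go (c :: rest) cur acc = PySem.Chars.split₀.go rest (c :: cur) acc := by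
  simp [PySem.Chars.split₀.go, h]

lemma special_not_space : ∀ a ∈ caracteres, PySem.Chars.isspace a = false := by
  intro a ha; fin_cases ha <;> rfl

lemma ws_space : ∀ a ∈ whitespaceB, PySem.Chars.isspace a = true := by
  intro a ha; fin_cases ha <;> rfl

lemma dom_not_space (a : Char) (h1 : pvDomChar a = true) (h2 : a ∉ whitespaceB) :
    PySem.Chars.isspace a = false := by
  simp [pvDomChar] at h1
  simp [whitespaceB] at h2
  have hinj : ∀ c : Char, a.toNat = c.toNat → a = c := fun c h => Char.ext (UInt32.toNat_inj.mp h)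
  have hn : ¬ (a.toNat = 32 ∨ a.toNat = 9 ∨ a.toNat = 10 ∨ a.toNat = 13) := by
    rintro (h | h | h | h)
    · exact h2.1 (hinj ' ' h)
    · exact h2.2.1 (hinj '\t' h)
    · exact h2.2.2.1 (hinj '\n' h)
    · exact h2.2.2.2.1 (hinj '\r' h)
  simp [PySem.Chars.isspace]
  omega

lemma specialsB_eq : specialsB = caracteres := rfl

lemma go_flatMap (p : List Char) : ∀ (buf : List Char) (acc : List (List Char)),
    (∀ c ∈ p, pvDomChar c = true) →
    (PySem.Chars.split₀.go (p.flatMap gAll) buf.reverse acc).map String.ofList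
      = acc.reverse.map String.ofList ++ T buf p := by
  induction p with
  | nil =>
    intro buf acc _
    by_cases hb : buf = [] <;> simp [go_nil, T, hb]
  | cons a t ih =>
    intro buf acc hdom
    have hda : pvDomChar a = true := hdom a List.mem_cons_self
    have hdt : ∀ c ∈ t, pvDomChar c = true := fun c hc => hdom c (List.mem_cons_of_mem a hc)
    simp only [List.flatMap_cons]
    by_cases h1 : a ∈ caracteres
    · have hsp : a ∈ specialsB := by rw [specialsB_eq]; exact h1
      have hna : PySem.Chars.isspace a = false := special_not_space a h1
      rw [show gAll a = [' ', a, ' '] from by simp [gAll, h1]]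
      simp only [List.cons_append, List.nil_append]
      rw [go_space ' ' rfl]
      by_cases hb : buf = []
      · subst hb
        rw [if_pos (by simp), go_nonspace a hna, go_space ' ' rfl, if_neg (by simp)]
        have := ih [] ([a].reverse :: acc) hdt
        simp only [List.reverse_nil] at this ⊢
        rw [this]
        simp [T, hsp]
      · rw [if_neg (by simpa using hb), go_nonspace a hna, go_space ' ' rfl, if_neg (by simp)]
        have := ih [] ([a].reverse :: (buf.reverse.reverse :: acc)) hdt
        simp only [List.reverse_nil] at this ⊢
        rw [this]
        simp [T, hsp, hb]
    · by_cases h2 : a ∈ whitespaceB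
      · have hws : PySem.Chars.isspace a = true := ws_space a h2
        rw [show gAll a = [a] from by simp [gAll, h1]]
        simp only [List.cons_append, List.nil_append]
        rw [go_space a hws]
        by_cases hb : buf = []
        · subst hb
          rw [if_pos (by simp)]
          have := ih [] acc hdt
          simp only [List.reverse_nil] at this ⊢
          rw [this]
          simp [T, h2, show a ∉ specialsB from by rw [specialsB_eq]; exact h1]
        · rw [if_neg (by simpa using hb)]
          have := ih [] (buf.reverse.reverse :: acc) hdt
          simp only [List.reverse_nil] at this ⊢
          rw [this]
          simp [T, h2, hb, show a ∉ specialsB from by rw [specialsB_eq]; exact h1]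
      · have hna : PySem.Chars.isspace a = false := dom_not_space a hda h2
        rw [show gAll a = [a] from by simp [gAll, h1]]
        simp only [List.cons_append, List.nil_append]
        rw [go_nonspace a hna, show a :: buf.reverse = (buf ++ [a]).reverse from by simp]
        rw [ih (buf ++ [a]) acc hdt]
        simp [T, h2, show a ∉ specialsB from by rw [specialsB_eq]; exact h1]

def stepB (st : List String × List Char) (ch : Char) : List String × List Char :=
  if specialsB.contains ch then
    ((if st.2.isEmpty then st.1 else st.1 ++ [String.ofList st.2]) ++ [String.ofList [ch]], [])
  else if whitespaceB.contains ch then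
    ((if st.2.isEmpty then st.1 else st.1 ++ [String.ofList st.2]), [])
  else (st.1, st.2 ++ [ch])

def flushB (st : List String × List Char) : List String :=
  if st.2.isEmpty then st.1 else st.1 ++ [String.ofList st.2]

lemma foldB_eq_T (p : List Char) : ∀ (out : List String) (buf : List Char),
    flushB (p.foldl stepB (out, buf)) = out ++ T buf p := by
  induction p with
  | nil =>
    intro out buf
    by_cases h : buf.isEmpty <;> simp [T, flushB, h]
  | cons a t ih =>
    intro out buf
    simp only [List.foldl_cons]
    by_cases h1 : a ∈ specialsB
    · rw [show stepB (out, buf) a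
          = ((if buf.isEmpty then out else out ++ [String.ofList buf]) ++ [String.ofList [a]], [])
          from by simp [stepB, h1], ih]
      by_cases hb : buf.isEmpty <;>
        simp [T, h1, hb]
    · by_cases h2 : a ∈ whitespaceB
      · rw [show stepB (out, buf) a
            = ((if buf.isEmpty then out else out ++ [String.ofList buf]), [])
            from by simp [stepB, h1, h2], ih]
        by_cases hb : buf.isEmpty <;>
          simp [T, h1, h2, hb]
      · rw [show stepB (out, buf) a = (out, buf ++ [a]) from by simp [stepB, h1, h2], ih]
        simp [T, h1, h2]

-- ===== VERDICT (by name: the statement is the Claim_ definition above) =====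
theorem separar_texto_spec : Claim_equal_separar_texto := by
  intro lista hdom
  have hwords : ∀ w ∈ lista, ∀ c ∈ w.toList, pvDomChar c = true := by
    intro w hw
    have := (List.all_eq_true.mp hdom) w hw
    simpa [pvDomStr, List.all_eq_true] using this
  unfold Spec_separar_texto separar_texto separar_texto_alt
  rw [PySem.List.foldl_congr_mem lista _
        (fun texto_separado w => texto_separado ++ T [] w.toList) []
        (by
          intro acc w hw
          show acc ++ (PySem.Chars.split₀
              (caracteres.foldl
                (fun palavra c => if palavra.contains c then separador palavra c else palavra)
                w.toList)).map String.ofList = acc ++ T [] w.toList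
          rw [foldA_eq_flatMap]
          have := go_flatMap w.toList [] [] (hwords w hw)
          simpa [PySem.Chars.split₀] using this)]
  exact (PySem.List.foldl_congr_mem lista _
        (fun out w => out ++ T [] w.toList) []
        (by
          intro out w _
          show flushB (w.toList.foldl stepB (out, [])) = out ++ T [] w.toList
          exact foldB_eq_T w.toList out [])).symm
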